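-- pv_equiv track=rewrite | github.com/psi-oss/get-physics-done | src/gpd/core/arxiv_source_fallback.py | _identify_main_tex
-- ===== SOURCE A (Python) =====
-- def _identify_main_tex(tex_files: dict[str, str]) -> str | None:
--     """Identify the main TeX file from a collection of source files.
--
--     Heuristics, in priority order:
--     1. File containing ``\\documentclass``
--     2. File named ``main.tex`` or ``paper.tex``
--     3. The largest ``.tex`` file
--     """
--     # Priority 1: contains \documentclass
--     for name, content in tex_files.items():
--         if name.endswith(".tex") and "\\documentclass" in content:
--             return name
--
--     # Priority 2: conventional names
--     for candidate in ("main.tex", "paper.tex", "ms.tex", "article.tex"):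
--         if candidate in tex_files:
--             return candidate
--
--     # Priority 3: largest .tex file
--     tex_only = {k: v for k, v in tex_files.items() if k.endswith(".tex")}
--     if tex_only:
--         return max(tex_only, key=lambda k: len(tex_only[k]))
--
--     return None
-- ===== SOURCE B (Python) =====
-- def _identify_main_tex(tex_files: dict[str, str]) -> str | None:
--     """Single pass: record first \\documentclass .tex and largest .tex, then decide."""
--     doc = None
--     largest = None
--     largest_len = -1
--     for name, content in tex_files.items():
--         if name.endswith(".tex"):
--             if doc is None and "\\documentclass" in content:
--                 doc = name
--             if len(content) > largest_len:
--                 largest = name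
--                 largest_len = len(content)
--     if doc is not None:
--         return doc
--     for candidate in ("main.tex", "paper.tex", "ms.tex", "article.tex"):
--         if candidate in tex_files:
--             return candidate
--     return largest
-- ===== Notes on version B (the rewrite author's own statement) =====
-- stated objective: alternative
-- what changed: A's three sequential passes (scan for \documentclass, probe conventional names, rebuild a .tex-only dict and take max by length) are merged into one loop over the items that records the first \documentclass .tex file and the running largest .tex file, deciding afterwards; Pre_ excludes association lists with duplicate keys, which cannot arise from a Python dict.
import Mathlib
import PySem

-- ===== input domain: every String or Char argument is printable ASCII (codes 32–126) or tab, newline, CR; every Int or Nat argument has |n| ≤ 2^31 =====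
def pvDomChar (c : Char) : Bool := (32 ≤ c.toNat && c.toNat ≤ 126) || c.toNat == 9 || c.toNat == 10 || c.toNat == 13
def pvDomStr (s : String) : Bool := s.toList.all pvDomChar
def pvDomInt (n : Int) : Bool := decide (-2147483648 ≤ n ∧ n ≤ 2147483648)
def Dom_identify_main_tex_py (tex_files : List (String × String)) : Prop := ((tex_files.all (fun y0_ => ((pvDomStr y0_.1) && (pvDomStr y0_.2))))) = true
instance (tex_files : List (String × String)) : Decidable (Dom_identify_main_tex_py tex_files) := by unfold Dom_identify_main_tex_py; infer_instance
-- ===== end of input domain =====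

-- B merges A's three passes into a single loop over the items that records the first
-- \documentclass .tex file and the running largest .tex file (objective: alternative decomposition).


-- ===== PORT A =====
-- first loop of A: first name ending in ".tex" whose content contains "\documentclass"
def pvP1 : List (String × String) → Option String
  | [] => none
  | (n, c) :: rest =>
      if PySem.Str.endswith n ".tex" && PySem.Str.isIn "\\documentclass" c then some n
      else pvP1 rest

-- second loop of A: first conventional candidate that is a key of the dict
def pvP2 (tex_files : List (String × String)) : List String → Option String
  | [] => none
  | c :: rest =>
      if (tex_files.map Prod.fst).contains c then some c
      else pvP2 tex_files rest

def identify_main_tex_py (tex_files : List (String × String)) : Option String :=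
  match pvP1 tex_files with
  | some n => some n
  | none =>
    match pvP2 tex_files ["main.tex", "paper.tex", "ms.tex", "article.tex"] with
    | some c => some c
    | none =>
      let texOnly := PySem.Dict.ofList (tex_files.filter (fun p => PySem.Str.endswith p.1 ".tex"))
      if texOnly.items.isEmpty then none
      else PySem.List.max? texOnly.keys (fun k => PySem.Str.len (texOnly.getD k ""))

-- ===== PORT B =====
-- B's single loop body: state = (doc, largest, largest_len)
def pvAltStep (st : Option String × Option String × Int) (p : String × String) :
    Option String × Option String × Int :=
  if PySem.Str.endswith p.1 ".tex" then
    ((if st.1.isNone && PySem.Str.isIn "\\documentclass" p.2 then some p.1 else st.1),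
     (if st.2.2 < PySem.Str.len p.2 then (some p.1, PySem.Str.len p.2) else st.2))
  else st

def identify_main_tex_py_alt (tex_files : List (String × String)) : Option String :=
  let st := tex_files.foldl pvAltStep (none, none, -1)
  match st.1 with
  | some n => some n
  | none =>
    match ["main.tex", "paper.tex", "ms.tex", "article.tex"].find?
            (fun c => tex_files.any (fun p => p.1 == c)) with
    | some c => some c
    | none => st.2.1

-- ===== PRECONDITION & SPEC =====
-- Pre_ excludes association lists with duplicate keys: they cannot arise from the Python
-- dict[str, str] argument, so A is never observed on them.
def Pre_identify_main_tex_py (tex_files : List (String × String)) : Prop :=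
  (tex_files.map Prod.fst).Nodup
instance (tex_files : List (String × String)) : Decidable (Pre_identify_main_tex_py tex_files) := by unfold Pre_identify_main_tex_py; infer_instance

def pvWitness_identify_main_tex_py : (List (String × String)) :=
  [("main.tex", "\\documentclass{article}"), ("notes.txt", "x")]

def Spec_identify_main_tex_py (tex_files : List (String × String)) (out : Option String) : Prop := out = identify_main_tex_py_alt tex_files
instance (tex_files : List (String × String)) (out : Option String) : Decidable (Spec_identify_main_tex_py tex_files out) := by unfold Spec_identify_main_tex_py; infer_instance

-- ===== CLAIM (what is proved, stated in full; the proofs are below) =====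
def Claim_equal_identify_main_tex_py : Prop := ∀ (tex_files : List (String × String)), Dom_identify_main_tex_py tex_files → Pre_identify_main_tex_py tex_files → Spec_identify_main_tex_py tex_files (identify_main_tex_py tex_files)

-- ===== LEMMAS AND PROOFS =====

-- length of the recorded largest file so far (-1 when none yet)
def pvLenOf : Option (String × String) → Int
  | none => -1
  | some p => PySem.Str.len p.2

-- specification-side running maximum over the pairs (guarded by ".tex"), first-wins on ties
def pvMx (acc : Option (String × String)) : List (String × String) → Option (String × String)
  | [] => acc
  | p :: rest =>
      pvMx (if PySem.Str.endswith p.1 ".tex" then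
              (match acc with
               | none => some p
               | some m => if PySem.Str.len m.2 < PySem.Str.len p.2 then some p else some m)
            else acc) rest

theorem pvLen_nonneg (s : String) : (0 : Int) ≤ PySem.Str.len s := by
  simp [PySem.Str.len]

theorem pvMain_fold : ∀ (xs : List (String × String)) (d : Option String)
    (acc : Option (String × String)),
    xs.foldl pvAltStep (d, acc.map Prod.fst, pvLenOf acc) =
      ((match d with | some n => some n | none => pvP1 xs),
       ((pvMx acc xs).map Prod.fst, pvLenOf (pvMx acc xs))) := by
  intro xs
  induction xs with
  | nil =>
    intro d acc
    cases d <;> simp [pvP1, pvMx]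
  | cons x xs ih =>
    intro d acc
    rw [List.foldl_cons]
    by_cases htex : PySem.Str.endswith x.1 ".tex"
    · -- step is the guarded update
      have hstep : pvAltStep (d, acc.map Prod.fst, pvLenOf acc) x =
          ((if d.isNone && PySem.Str.isIn "\\documentclass" x.2 then some x.1 else d),
           ((match acc with
             | none => some x
             | some m => if PySem.Str.len m.2 < PySem.Str.len x.2 then some x else some m).map Prod.fst,
            pvLenOf (match acc with
             | none => some x
             | some m => if PySem.Str.len m.2 < PySem.Str.len x.2 then some x else some m))) := by
        cases acc with
        | none =>
          have hl : pvLenOf none < PySem.Str.len x.2 := by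
            simp only [pvLenOf]
            exact lt_of_lt_of_le (by norm_num) (pvLen_nonneg _)
          simp only [pvAltStep]
          rw [if_pos htex, if_pos hl]
          rfl
        | some m =>
          simp only [pvAltStep]
          rw [if_pos htex]
          by_cases hlt : pvLenOf (some m) < PySem.Str.len x.2
          · rw [if_pos hlt]
            have hlt' : PySem.Str.len m.2 < PySem.Str.len x.2 := hlt
            rw [if_pos hlt']
            rfl
          · rw [if_neg hlt]
            have hlt' : ¬ PySem.Str.len m.2 < PySem.Str.len x.2 := hlt
            rw [if_neg hlt']
      rw [hstep, ih]
      simp only [pvMx]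
      rw [if_pos htex]
      -- doc component
      cases d with
      | some n => rfl
      | none =>
        simp only [Option.isNone_none, Bool.true_and]
        have hp1 : pvP1 (x :: xs) =
            (if PySem.Str.isIn "\\documentclass" x.2 then some x.1 else pvP1 xs) := by
          rcases x with ⟨n, c⟩
          simp only [pvP1]
          rw [htex]
          rw [Bool.true_and]
        rw [hp1]
        by_cases hin : PySem.Str.isIn "\\documentclass" x.2
        · rw [if_pos hin]
          try rfl
          try rw [if_pos hin]
        · rw [Bool.not_eq_true] at hin
          simp only [hin, Bool.false_eq_true, if_false]
    · have hstep : pvAltStep (d, acc.map Prod.fst, pvLenOf acc) x =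
          (d, acc.map Prod.fst, pvLenOf acc) := by
        simp only [pvAltStep]
        rw [if_neg htex]
      rw [hstep, ih]
      simp only [pvMx]
      rw [if_neg htex]
      cases d with
      | some n => rfl
      | none =>
        have : pvP1 (x :: xs) = pvP1 xs := by
          rcases x with ⟨n, c⟩
          simp only [pvP1]
          rw [if_neg]
          simp only [Bool.and_eq_true]
          rintro ⟨h1, _⟩
          exact htex h1
        rw [this]

theorem pvMx_filter : ∀ (xs : List (String × String)) (acc : Option (String × String)),
    pvMx acc xs = pvMx acc (xs.filter (fun p => PySem.Str.endswith p.1 ".tex")) := by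
  intro xs
  induction xs with
  | nil => intro acc; rfl
  | cons x xs ih =>
    intro acc
    simp only [pvMx, List.filter_cons]
    by_cases h : PySem.Str.endswith x.1 ".tex"
    · rw [if_pos h, if_pos h]
      simp only [pvMx]
      rw [if_pos h]
      exact ih _
    · rw [if_neg h, if_neg h]
      exact ih acc

theorem pvContains_eq_any (xs : List (String × String)) (c : String) :
    (xs.map Prod.fst).contains c = xs.any (fun p => p.1 == c) := by
  induction xs with
  | nil => rfl
  | cons x xs ih =>
    simp_all
    rw [show (c == x.1) = (x.1 == c) by simp [eq_comm]]

theorem pvP2_eq_find? : ∀ (cands : List String) (xs : List (String × String)),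
    pvP2 xs cands = cands.find? (fun c => xs.any (fun p => p.1 == c)) := by
  intro cands xs
  induction cands with
  | nil => rfl
  | cons c rest ih =>
    rw [pvP2, pvContains_eq_any, List.find?]
    by_cases h : xs.any (fun p => p.1 == c) <;> simp [h, ih]

theorem pvFind_self : ∀ (ys : List (String × String)), (ys.map Prod.fst).Nodup →
    ∀ p ∈ ys, ys.find? (fun q => q.1 == p.1) = some p := by
  intro ys
  induction ys with
  | nil => simp
  | cons q ys ih =>
    intro hnd p hp
    simp only [List.map_cons, List.nodup_cons] at hnd
    rcases List.mem_cons.1 hp with rfl | hp'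
    · simp [List.find?]
    · have hne : ¬ (q.1 == p.1) = true := by
        simp only [beq_iff_eq]
        intro h; exact hnd.1 (h ▸ List.mem_map_of_mem hp')
      rw [List.find?]
      simp only [hne]
      exact ih hnd.2 p hp'

theorem pvUpdate_items : ∀ (ys : List (String × String)) (d : PySem.Dict String String),
    ((d.items ++ ys).map Prod.fst).Nodup → (d.update ys).items = d.items ++ ys := by
  intro ys
  induction ys with
  | nil => intro d _; simp [PySem.Dict.update]
  | cons p ys ih =>
    intro d hnd
    have hnotin : p.1 ∉ d.items.map Prod.fst := by
      simp only [List.map_append, List.map_cons] at hnd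
      have hdisj := List.disjoint_of_nodup_append hnd
      intro hmem
      exact hdisj hmem List.mem_cons_self
    have hcon : d.contains p.1 = false := by
      simp only [PySem.Dict.contains, List.any_eq_false]
      intro q hq
      simp only [beq_iff_eq]
      intro h
      exact hnotin (h ▸ List.mem_map_of_mem hq)
    have hins : (d.insert p.1 p.2).items = d.items ++ [p] := by
      simp [PySem.Dict.insert, hcon]
    have hstep : d.update (p :: ys) = (d.insert p.1 p.2).update ys := by
      simp [PySem.Dict.update]
    rw [hstep, ih (d.insert p.1 p.2) (by rw [hins]; simpa [List.append_assoc] using hnd), hins]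
    simp

theorem pvMx_max? (f : String → Int) :
    ∀ (ys : List (String × String)) (acc : Option (String × String)),
    (∀ p ∈ ys, f p.1 = PySem.Str.len p.2) →
    (∀ m, acc = some m → f m.1 = PySem.Str.len m.2) →
    (∀ p ∈ ys, PySem.Str.endswith p.1 ".tex" = true) →
    PySem.List.max? ((acc.toList ++ ys).map Prod.fst) f = (pvMx acc ys).map Prod.fst := by
  intro ys
  induction ys with
  | nil =>
    intro acc _ _ _
    cases acc with
    | none => rfl
    | some m => rfl
  | cons p ys ih =>
    intro acc hf hacc htex
    have htp : PySem.Str.endswith p.1 ".tex" = true := htex p List.mem_cons_self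
    have hf' : ∀ q ∈ ys, f q.1 = PySem.Str.len q.2 := fun q hq => hf q (List.mem_cons_of_mem _ hq)
    have htex' : ∀ q ∈ ys, PySem.Str.endswith q.1 ".tex" = true :=
      fun q hq => htex q (List.mem_cons_of_mem _ hq)
    have hp : f p.1 = PySem.Str.len p.2 := hf p List.mem_cons_self
    cases acc with
    | none =>
      have hrhs : pvMx none (p :: ys) = pvMx (some p) ys := by
        simp only [pvMx]
        rw [if_pos htp]
      rw [hrhs]
      exact ih (some p) hf' (by rintro m h; cases h; exact hp) htex'
    | some m =>
      have hm : f m.1 = PySem.Str.len m.2 := hacc m rfl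
      have hrhs : pvMx (some m) (p :: ys) =
          pvMx (if PySem.Str.len m.2 < PySem.Str.len p.2 then some p else some m) ys := by
        simp only [pvMx]
        rw [if_pos htp]
      rw [hrhs]
      by_cases hlt : PySem.Str.len m.2 < PySem.Str.len p.2
      · rw [if_pos hlt]
        have hkey : PySem.List.max? (((some m).toList ++ p :: ys).map Prod.fst) f =
            PySem.List.max? (((some p).toList ++ ys).map Prod.fst) f := by
          simp only [Option.toList_some, List.singleton_append, List.map_cons, PySem.List.max?,
            List.foldl_cons]
          have : f m.1 < f p.1 := by rw [hm, hp]; exact hlt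
          rw [if_pos this]
        rw [hkey]
        exact ih (some p) hf' (by rintro m' h; cases h; exact hp) htex'
      · rw [if_neg hlt]
        have hkey : PySem.List.max? (((some m).toList ++ p :: ys).map Prod.fst) f =
            PySem.List.max? (((some m).toList ++ ys).map Prod.fst) f := by
          simp only [Option.toList_some, List.singleton_append, List.map_cons, PySem.List.max?,
            List.foldl_cons]
          have : ¬ f m.1 < f p.1 := by rw [hm, hp]; exact hlt
          rw [if_neg this]
        rw [hkey]
        exact ih (some m) hf' (by rintro m' h; cases h; exact hm) htex'

-- ===== VERDICT (by name: the statement is the Claim_ definition above) =====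
theorem identify_main_tex_py_spec : Claim_equal_identify_main_tex_py := by
  intro xs _hdom hpre
  unfold Spec_identify_main_tex_py identify_main_tex_py identify_main_tex_py_alt
  have hfold := pvMain_fold xs none none
  simp only [Option.map_none, pvLenOf] at hfold
  rw [hfold]
  cases hp1 : pvP1 xs with
  | some n => rfl
  | none =>
    simp only
    rw [← pvP2_eq_find?]
    cases hp2 : pvP2 xs ["main.tex", "paper.tex", "ms.tex", "article.tex"] with
    | some c => rfl
    | none =>
      simp only
      -- third branch: the largest .tex file
      have hnd : ((xs.filter (fun p => PySem.Str.endswith p.1 ".tex")).map Prod.fst).Nodup :=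
        hpre.sublist (List.Sublist.map Prod.fst List.filter_sublist)
      have hitems : (PySem.Dict.ofList (xs.filter (fun p => PySem.Str.endswith p.1 ".tex"))).items
          = xs.filter (fun p => PySem.Str.endswith p.1 ".tex") := by
        have h := pvUpdate_items (xs.filter (fun p => PySem.Str.endswith p.1 ".tex"))
          PySem.Dict.empty (by simpa [PySem.Dict.empty] using hnd)
        simpa [PySem.Dict.ofList, PySem.Dict.empty] using h
      have hgetD : ∀ p ∈ xs.filter (fun q => PySem.Str.endswith q.1 ".tex"),
          (PySem.Dict.ofList (xs.filter (fun q => PySem.Str.endswith q.1 ".tex"))).getD p.1 "" = p.2 := by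
        intro p hp
        simp only [PySem.Dict.getD, PySem.Dict.get?, hitems]
        rw [pvFind_self _ hnd p hp]
        rfl
      have hkeys : (PySem.Dict.ofList (xs.filter (fun p => PySem.Str.endswith p.1 ".tex"))).keys
          = (xs.filter (fun p => PySem.Str.endswith p.1 ".tex")).map Prod.fst := by
        simp only [PySem.Dict.keys, hitems]
      rw [pvMx_filter xs none]
      by_cases hys : (PySem.Dict.ofList (xs.filter (fun p => PySem.Str.endswith p.1 ".tex"))).items.isEmpty
      · rw [if_pos hys]
        rw [hitems] at hys
        rw [List.isEmpty_iff] at hys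
        rw [hys]
        rfl
      · rw [if_neg hys]
        rw [hkeys]
        exact pvMx_max?
          (fun k => PySem.Str.len
            ((PySem.Dict.ofList (xs.filter (fun p => PySem.Str.endswith p.1 ".tex"))).getD k ""))
          _ none
          (fun p hp => by simp only; rw [hgetD p hp])
          (by rintro m h; cases h)
          (fun p hp => (List.mem_filter.1 hp).2)
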